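-- pv_equiv track=rewrite | github.com/Chao2433/FedAFD | src/losses/OLE.py | full_sampling
-- ===== SOURCE A (Python) =====
-- def full_sampling(N):
--     matched = []
--     for i in range(N):
--         for j in range(N):
--             if i == j:
--                 matched.append(1)
--             else:
--                 matched.append(0)
--     return matched
-- ===== SOURCE B (Python) =====
-- def full_sampling(N):
--     matched = [0] * N * N
--     for i in range(N):
--         matched[N * i + i] = 1
--     return matched
-- ===== Notes on version B (the rewrite author's own statement) =====
-- stated objective: simpler
-- what changed: Replaces the nested NxN loop with a per-cell equality branch by a single flat zero allocation plus one N-step pass writing only the diagonal entries.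
import Mathlib
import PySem

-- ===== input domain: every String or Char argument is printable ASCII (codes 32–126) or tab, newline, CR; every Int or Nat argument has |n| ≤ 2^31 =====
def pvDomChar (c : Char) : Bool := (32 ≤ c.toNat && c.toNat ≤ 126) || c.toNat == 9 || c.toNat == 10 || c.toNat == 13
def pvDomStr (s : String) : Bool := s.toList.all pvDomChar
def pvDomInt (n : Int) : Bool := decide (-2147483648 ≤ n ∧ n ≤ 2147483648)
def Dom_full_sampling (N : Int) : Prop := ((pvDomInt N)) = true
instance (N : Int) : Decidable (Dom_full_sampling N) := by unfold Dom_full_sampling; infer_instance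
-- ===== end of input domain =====

-- B replaces the nested N×N loop (a branch per cell) by one flat zero allocation
-- plus a single N-step pass writing 1 at the diagonal indices (objective: simpler).

-- ===== PORT A =====
def full_sampling (N : Int) : List Int :=
  (PySem.List.pyRange 0 N 1).foldl
    (fun matched i =>
      (PySem.List.pyRange 0 N 1).foldl
        (fun matched j => matched ++ [if i == j then (1 : Int) else 0])
        matched)
    []

-- ===== PORT B =====
def full_sampling_alt (N : Int) : List Int :=
  (PySem.List.pyRange 0 N 1).foldl
    (fun matched i => PySem.List.pySetD matched (N * i + i) 1)
    (PySem.List.pyRepeat (PySem.List.pyRepeat [(0 : Int)] N) N)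

-- ===== PRECONDITION & SPEC =====
def Spec_full_sampling (N : Int) (out : List Int) : Prop := out = full_sampling_alt N
instance (N : Int) (out : List Int) : Decidable (Spec_full_sampling N out) := by unfold Spec_full_sampling; infer_instance

-- ===== CLAIM (what is proved, stated in full; the proofs are below) =====
def Claim_equal_full_sampling : Prop := ∀ (N : Int), Dom_full_sampling N → Spec_full_sampling N (full_sampling N)

-- ===== LEMMAS AND PROOFS =====

-- row k of the n×n identity matrix (meaningful for k < n)
def zrow (n k : Nat) : List Int := List.replicate k 0 ++ 1 :: List.replicate (n - k - 1) 0

theorem length_zrow (n k : Nat) (h : k < n) : (zrow n k).length = n := by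
  simp [zrow]; omega

theorem length_flatMap_zrow (n : Nat) : ∀ k, k ≤ n →
    ((List.range k).flatMap (zrow n)).length = k * n := by
  intro k
  induction k with
  | zero => simp
  | succ m ih =>
    intro h
    rw [List.range_succ, List.flatMap_append, List.length_append, ih (by omega)]
    simp [length_zrow n m (by omega)]
    ring

theorem flatMap_single {α β : Type} (f : α → β) (l : List α) :
    l.flatMap (fun x => [f x]) = l.map f := by
  induction l <;> simp_all

theorem set_replicate {α : Type} (a b : α) : ∀ (j m : Nat), j < m →
    (List.replicate m a).set j b = List.replicate j a ++ b :: List.replicate (m - j - 1) a := by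
  intro j
  induction j with
  | zero =>
    intro m hm
    cases m with
    | zero => omega
    | succ m' => simp [List.replicate_succ]
  | succ i ih =>
    intro m hm
    cases m with
    | zero => omega
    | succ m' =>
      simp only [List.replicate_succ, List.set]
      rw [ih m' (by omega)]
      simp

theorem flatten_replicate_replicate {α : Type} (a : α) : ∀ (n m : Nat),
    (List.replicate n (List.replicate m a)).flatten = List.replicate (n * m) a := by
  intro n m
  induction n with
  | zero => simp
  | succ k ih =>
    rw [List.replicate_succ, List.flatten_cons, ih, ← List.replicate_add]
    congr 1
    ring

-- the row computed by A's inner loop is zrow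
theorem rowNat (n : Nat) : ∀ k, k < n →
    (List.range n).map (fun j => if k = j then (1 : Int) else 0) = zrow n k := by
  induction n with
  | zero => intro k h; omega
  | succ m ih =>
    intro k h
    rw [List.range_succ, List.map_append]
    by_cases hk : k < m
    · rw [ih k hk]
      simp only [zrow]
      rw [show m + 1 - k - 1 = (m - k - 1) + 1 by omega, List.replicate_succ']
      simp [show ¬ k = m by omega]
    · have hkm : k = m := by omega
      subst hkm
      have hz : (List.range k).map (fun j => if k = j then (1 : Int) else 0)
          = List.replicate k 0 := by
        rw [List.eq_replicate_iff]
        constructor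
        · simp
        · intro b hb
          simp only [List.mem_map, List.mem_range] at hb
          obtain ⟨j, hj, hbj⟩ := hb
          rw [← hbj, if_neg (by omega)]
      rw [hz]
      simp [zrow]

-- B's diagonal-writing fold completes the identity matrix row by row
theorem foldB (n : Nat) : ∀ (c k : Nat), k + c = n →
    (List.range' k c).foldl (fun m i => m.set (n * i + i) 1)
      ((List.range k).flatMap (zrow n) ++ List.replicate ((n - k) * n) 0)
    = (List.range n).flatMap (zrow n) := by
  intro c
  induction c with
  | zero =>
    intro k hk
    have : k = n := by omega
    subst this
    simp
  | succ c ih =>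
    intro k hk
    have hkn : k < n := by omega
    rw [List.range'_succ, List.foldl_cons]
    have hlen : ((List.range k).flatMap (zrow n)).length = k * n :=
      length_flatMap_zrow n k (by omega)
    have hset :
        (((List.range k).flatMap (zrow n)) ++ List.replicate ((n - k) * n) 0).set (n * k + k) 1
        = ((List.range (k + 1)).flatMap (zrow n)) ++ List.replicate ((n - (k + 1)) * n) 0 := by
      rw [List.set_append, if_neg (by rw [hlen]; nlinarith)]
      rw [hlen, show n * k + k - k * n = k by rw [Nat.mul_comm]; omega]
      have hklt : k < (n - k) * n := by
        have h1 : 1 ≤ n - k := by omega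
        calc k < n := hkn
          _ = 1 * n := by omega
          _ ≤ (n - k) * n := Nat.mul_le_mul_right n h1
      rw [set_replicate 0 1 k ((n - k) * n) hklt]
      rw [List.range_succ, List.flatMap_append]
      have h2 : (n - k) * n = (n - k - 1) * n + n := by
        rw [show n - k = (n - k - 1) + 1 from by omega, Nat.succ_mul]
        simp
      have harith : (n - k) * n - k - 1 = (n - k - 1) + (n - (k + 1)) * n := by
        rw [show n - (k + 1) = n - k - 1 from by omega]
        omega
      rw [harith, List.replicate_add]
      simp [zrow]
    rw [hset, ih (k + 1) (by omega)]

-- A equals the flattened identity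
theorem A_eq (N : Int) : full_sampling N = (List.range N.toNat).flatMap (zrow N.toNat) := by
  unfold full_sampling
  rw [PySem.List.pyRange_one]
  simp only [zero_add, sub_zero]
  rw [List.foldl_map]
  have hin : ∀ (i : Nat) (acc : List Int),
      (List.map (fun k : Nat => (k : Int)) (List.range N.toNat)).foldl
        (fun matched j => matched ++ [if (i : Int) == j then (1 : Int) else 0]) acc
      = acc ++ zrow N.toNat i ∨ N.toNat ≤ i := by
    intro i acc
    by_cases hi : i < N.toNat
    · left
      rw [List.foldl_map, PySem.List.foldl_append_eq_flatMap]
      congr 1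
      rw [flatMap_single, ← rowNat N.toNat i hi]
      apply List.map_congr_left
      intro j _
      congr 1
      simp
    · right; omega
  have houter : ∀ (l : List Nat), (∀ i ∈ l, i < N.toNat) → ∀ (acc : List Int),
      l.foldl (fun matched (i : Nat) =>
        (List.map (fun k : Nat => (k : Int)) (List.range N.toNat)).foldl
          (fun matched j => matched ++ [if (i : Int) == j then (1 : Int) else 0]) matched) acc
      = acc ++ l.flatMap (zrow N.toNat) := by
    intro l
    induction l with
    | nil => intro _ acc; simp
    | cons a t iht =>
      intro hmem acc
      rw [List.foldl_cons]
      rcases hin a acc with h | h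
      · rw [h, iht (fun i hi => hmem i (List.mem_cons_of_mem a hi)), List.flatMap_cons,
          List.append_assoc]
      · exact absurd (hmem a (List.mem_cons_self)) (by omega)
  rw [houter (List.range N.toNat) (by intro i hi; exact List.mem_range.mp hi) []]
  simp

-- B equals the flattened identity
theorem B_eq (N : Int) : full_sampling_alt N = (List.range N.toNat).flatMap (zrow N.toNat) := by
  unfold full_sampling_alt
  rw [PySem.List.pyRange_one, PySem.List.pyRepeat_singleton]
  simp only [zero_add, sub_zero]
  rw [List.foldl_map]
  by_cases hN : N ≤ 0
  · have h0 : N.toNat = 0 := by omega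
    rw [h0]
    simp [PySem.List.pyRepeat, Int.toNat_of_nonpos hN]
  · have hN' : 0 < N := by omega
    have hNn : N = (N.toNat : Int) := by omega
    have hrep : PySem.List.pyRepeat (List.replicate N.toNat (0 : Int)) N
        = List.replicate (N.toNat * N.toNat) 0 := by
      simp only [PySem.List.pyRepeat]
      exact flatten_replicate_replicate 0 N.toNat N.toNat
    rw [hrep]
    have hfun : ∀ (m : List Int) (i : Nat),
        PySem.List.pySetD m (N * (i : Int) + (i : Int)) 1 = m.set (N.toNat * i + i) 1 := by
      intro m i
      have hi0 : (0 : Int) ≤ (i : Int) := Int.natCast_nonneg i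
      have hnn : (0 : Int) ≤ N * (i : Int) + (i : Int) := by nlinarith
      rw [PySem.List.pySetD_of_nonneg m 1 hnn]
      congr 1
      conv_lhs => rw [hNn]
      rw [show ((N.toNat : Int) * (i : Int) + (i : Int)) = ((N.toNat * i + i : Nat) : Int) from by
        push_cast; ring, Int.toNat_natCast]
    simp only [hfun]
    have := foldB N.toNat N.toNat 0 (by omega)
    rw [← List.range_eq_range'] at this
    simpa using this

-- ===== VERDICT (by name: the statement is the Claim_ definition above) =====
theorem full_sampling_spec : Claim_equal_full_sampling := by
  intro N _
  unfold Spec_full_sampling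
  rw [A_eq, B_eq]
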